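-- pv_equiv track=rewrite | github.com/genievy/codewars | tasks_from_codewars/6kyu/Valid string.py | valid_word
-- ===== SOURCE A (Python) =====
-- def valid_word(seq, word: str, result=False):
--     for i in range(len(seq)):
--         word_prim = word
--         li = seq[i:] + seq[:i]
--         for a in range(len(word)):
--             for n in li:
--                 if word_prim.startswith(n):
--                     word_prim = word_prim.replace(n, '', 1)
--                     break
--             if len(word_prim) == 0:
--                 result = True
--                 break
--         if result:
--             break
--     return result
-- ===== SOURCE B (Python) =====
-- def valid_word(seq, word: str, result=False):
--     # B: precompute a position->matching-piece-index table once, then walk an index cursor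
--     # per rotation, picking the match with minimal rotated rank; no string mutation.
--     n = len(seq)
--     L = len(word)
--     matches = [[j for j in range(n) if word.startswith(seq[j], pos)] for pos in range(L)]
--     def run(i):
--         pos = 0
--         while pos < L:
--             ms = matches[pos]
--             if not ms:
--                 return False
--             j = min(ms, key=lambda j: (j - i) % n)
--             if not seq[j]:
--                 return False
--             pos += len(seq[j])
--         return True
--     return result or any(run(i) for i in range(n))
-- ===== Notes on version B (the rewrite author's own statement) =====
-- stated objective: alternative
-- what changed: Replaced A's per-rotation greedy that mutates a string copy with a staged algorithm: precompute once a position->matching-piece-index table, then for each rotation walk an integer cursor through the word, selecting at each position the match of minimal rotated rank (j-i) mod n via min(); the repeated per-rotation startswith scans over string copies disappear.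
-- intended difference: On an empty word with a nonempty seq and result=False, A returns False because its inner loop over range(len(word)) never runs, while B returns True; the empty word is trivially consumable by zero pieces, so True is the intended value. — e.g. on valid_word(["ab"], "", false): A returns false, B returns true
import Mathlib
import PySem

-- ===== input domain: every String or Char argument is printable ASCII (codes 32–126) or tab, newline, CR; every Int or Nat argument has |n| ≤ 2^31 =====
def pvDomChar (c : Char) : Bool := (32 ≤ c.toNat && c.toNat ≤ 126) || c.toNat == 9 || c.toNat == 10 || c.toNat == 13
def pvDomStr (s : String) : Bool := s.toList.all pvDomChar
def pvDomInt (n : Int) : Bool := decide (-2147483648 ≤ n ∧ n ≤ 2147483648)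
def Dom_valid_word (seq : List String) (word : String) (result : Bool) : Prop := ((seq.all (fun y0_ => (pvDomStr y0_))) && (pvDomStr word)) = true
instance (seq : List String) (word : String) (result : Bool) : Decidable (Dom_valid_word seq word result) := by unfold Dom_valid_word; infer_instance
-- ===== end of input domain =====

-- B precomputes a position→matching-piece-index table once, then walks an integer cursor per
-- rotation picking the match of minimal rotated rank; same answers except word='' (see D_ below).
-- ===== PORT A =====
-- s.replace(old, '', 1): removes the first occurrence of old (exact: empty old inserts '' at
-- position 0, leaving s unchanged, as Python does). Hand port; PySem.Chars.replace has no count.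
def pvReplace1 (s old : List Char) : List Char :=
  if PySem.Chars.find s old = -1 then s
  else s.take (PySem.Chars.find s old).toNat ++ s.drop ((PySem.Chars.find s old).toNat + old.length)

-- the inner "for n in li: if word_prim.startswith(n): … break" scan
def aScan (li : List String) (wp : List Char) : List Char :=
  match li with
  | [] => wp
  | n :: rest => if PySem.Chars.startswith wp n.toList then pvReplace1 wp n.toList else aScan rest wp

-- the "for a in range(len(word))" loop, fuel = len(word)
def aInner (li : List String) (fuel : Nat) (wp : List Char) (result : Bool) : Bool :=
  match fuel with
  | 0 => result
  | f + 1 =>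
    let wp' := aScan li wp
    if wp'.length = 0 then true else aInner li f wp' result

-- the "for i in range(len(seq))" loop with its "if result: break"
def aOuter (seq : List String) (word : List Char) (idxs : List Nat) (result : Bool) : Bool :=
  match idxs with
  | [] => result
  | i :: rest =>
    let li := PySem.List.slice seq (some (i : Int)) none ++ PySem.List.slice seq none (some (i : Int))
    let r := aInner li word.length word result
    if r then r else aOuter seq word rest r

def valid_word (seq : List String) (word : String) (result : Bool) : Bool :=
  aOuter seq word.toList (List.range seq.length) result

-- ===== PORT B =====
-- matches = [[j for j in range(n) if word.startswith(seq[j], pos)] for pos in range(L)]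
def bMatches (seq : List String) (w : List Char) (L n : Nat) : List (List Nat) :=
  (List.range L).map (fun pos => (List.range n).filter (fun j => PySem.Chars.startswith (w.drop pos) (seq.getD j "").toList))

-- run(i): the while loop over the cursor pos; min(ms, key=lambda j: (j - i) % n) is
-- PySem.List.min? (first minimal element, Python's min semantics)
def bRun (seq : List String) (tbl : List (List Nat)) (L n i pos : Nat) : Bool :=
  if _h : pos < L then
    match PySem.List.min? (tbl.getD pos []) (fun j => PySem.Int.mod ((j : Int) - (i : Int)) (n : Int)) with
    | none => false
    | some j =>
      if _hp : (seq.getD j "").toList.length = 0 then false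
      else bRun seq tbl L n i (pos + (seq.getD j "").toList.length)
  else true
termination_by L - pos
decreasing_by omega

def valid_word_alt (seq : List String) (word : String) (result : Bool) : Bool :=
  let n := seq.length
  let L := word.toList.length
  let tbl := bMatches seq word.toList L n
  result || (List.range n).any (fun i => bRun seq tbl L n i 0)

-- ===== PRECONDITION & SPEC =====
-- On an empty word with a nonempty seq and result=False, A returns False (its inner loop over
-- range(len(word)) never runs) while B returns True: the empty word is trivially consumable
-- (zero pieces), so B's value is the intended one.
def D_valid_word (seq : List String) (word : String) (result : Bool) : Prop :=
  word.toList = [] ∧ seq ≠ [] ∧ result = false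
instance (seq : List String) (word : String) (result : Bool) : Decidable (D_valid_word seq word result) := by unfold D_valid_word; infer_instance
def Spec_valid_word (seq : List String) (word : String) (result : Bool) (out : Bool) : Prop := ¬ D_valid_word seq word result → out = valid_word_alt seq word result
instance (seq : List String) (word : String) (result : Bool) (out : Bool) : Decidable (Spec_valid_word seq word result out) := by unfold Spec_valid_word; infer_instance
def pvDiffWitness_valid_word : List String × String × Bool := (["ab"], "", false)
def pvDiffWitnessOut_valid_word : Bool × Bool := (false, true)

-- ===== CLAIM (what is proved, stated in full; the proofs are below) =====
def Claim_unchanged_valid_word : Prop := ∀ (seq : List String) (word : String) (result : Bool), Dom_valid_word seq word result → Spec_valid_word seq word result (valid_word seq word result)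
def Claim_changed_valid_word : Prop := Dom_valid_word (pvDiffWitness_valid_word.1) (pvDiffWitness_valid_word.2.1) (pvDiffWitness_valid_word.2.2) ∧ D_valid_word (pvDiffWitness_valid_word.1) (pvDiffWitness_valid_word.2.1) (pvDiffWitness_valid_word.2.2) ∧ valid_word (pvDiffWitness_valid_word.1) (pvDiffWitness_valid_word.2.1) (pvDiffWitness_valid_word.2.2) = pvDiffWitnessOut_valid_word.1 ∧ valid_word_alt (pvDiffWitness_valid_word.1) (pvDiffWitness_valid_word.2.1) (pvDiffWitness_valid_word.2.2) = pvDiffWitnessOut_valid_word.2 ∧ pvDiffWitnessOut_valid_word.1 ≠ pvDiffWitnessOut_valid_word.2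
def Claim_exact_valid_word : Prop := ∀ (seq : List String) (word : String) (result : Bool), Dom_valid_word seq word result → D_valid_word seq word result → valid_word seq word result ≠ valid_word_alt seq word result

-- ===== LEMMAS AND PROOFS =====

-- proof-side reference greedy: first piece of li that is a prefix of w, stripped until empty
def gFirst (pieces : List String) (w : List Char) : Option String :=
  match pieces with
  | [] => none
  | p :: rest => if PySem.Chars.startswith w p.toList then some p else gFirst rest w

def gConsume (w : List Char) (pieces : List String) : Bool :=
  if hw : w = [] then true
  else
    match gFirst pieces w with
    | none => false
    | some p =>
      if hp : p.toList.length = 0 then false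
      else gConsume (w.drop p.toList.length) pieces
termination_by w.length
decreasing_by
  have := List.length_pos_of_ne_nil hw
  simp only [List.length_drop]
  omega

-- ---- A-side: aInner/aOuter compute gConsume ----

theorem pvReplace1_prefix (w p : List Char) (h : p <+: w) : pvReplace1 w p = w.drop p.length := by
  have hnn : 0 ≤ PySem.Chars.find w p := (PySem.Chars.find_nonneg_iff w p).mpr h.isInfix
  have hz : PySem.Chars.find w p = 0 := by
    have hs := PySem.Chars.find_spec hnn
    by_contra hne
    exact hs.2 0 (by omega) (by simpa using h)
  simp [pvReplace1, hz]

theorem scan_none (li : List String) (w : List Char) (h : gFirst li w = none) : aScan li w = w := by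
  induction li with
  | nil => simp [aScan]
  | cons n rest ih =>
    by_cases hs : PySem.Chars.startswith w n.toList = true
    · simp [gFirst, hs] at h
    · simp [gFirst, hs] at h
      simp [aScan, hs, ih h]

theorem scan_some (li : List String) (w : List Char) (p : String) (h : gFirst li w = some p) :
    aScan li w = w.drop p.toList.length ∧ p.toList <+: w := by
  induction li with
  | nil => simp [gFirst] at h
  | cons n rest ih =>
    by_cases hs : PySem.Chars.startswith w n.toList = true
    · simp [gFirst, hs] at h
      subst h
      have hp : n.toList <+: w := (PySem.Chars.startswith_iff _ _).mp hs
      refine ⟨?_, hp⟩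
      show (if PySem.Chars.startswith w n.toList = true then pvReplace1 w n.toList else aScan rest w)
          = w.drop n.toList.length
      rw [if_pos hs, pvReplace1_prefix w n.toList hp]
    · simp [gFirst, hs] at h
      have := ih h
      simpa [aScan, hs] using this

theorem inner_stuck (li : List String) (w : List Char) (res : Bool) (hw : w ≠ [])
    (h : aScan li w = w) : ∀ f, aInner li f w res = res := by
  intro f
  induction f with
  | zero => rfl
  | succ f ih =>
    have hl : w.length ≠ 0 := by cases w <;> simp_all
    simp [aInner, h, hl, ih]

theorem gConsume_nil (pieces : List String) : gConsume [] pieces = true := by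
  simp [gConsume]

theorem inner_eq (li : List String) (res : Bool) :
    ∀ (f : Nat) (w : List Char), w ≠ [] → w.length ≤ f →
      aInner li f w res = (if gConsume w li then true else res) := by
  intro f
  induction f with
  | zero =>
    intro w hw hl
    cases w with
    | nil => exact absurd rfl hw
    | cons c cs => simp at hl
  | succ f ih =>
    intro w hw hl
    obtain ⟨c, cs, rfl⟩ : ∃ c cs, w = c :: cs := by
      cases w with
      | nil => exact absurd rfl hw
      | cons c cs => exact ⟨c, cs, rfl⟩
    cases hb : gFirst li (c :: cs) with
    | none =>
      have hA := scan_none li (c :: cs) hb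
      have hC : gConsume (c :: cs) li = false := by
        simp [gConsume, hb]
      rw [inner_stuck li (c :: cs) res hw hA, hC]
      simp
    | some p =>
      obtain ⟨hA, hpre⟩ := scan_some li (c :: cs) p hb
      by_cases hp0 : p.toList.length = 0
      · have hp : p.toList = [] := List.length_eq_zero_iff.mp hp0
        have hA' : aScan li (c :: cs) = c :: cs := by simp [hA, hp]
        have hC : gConsume (c :: cs) li = false := by
          simp [gConsume, hb, hp]
        rw [inner_stuck li (c :: cs) res hw hA', hC]
        simp
      · have hC : gConsume (c :: cs) li = gConsume ((c :: cs).drop p.toList.length) li := by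
          have hpne : p ≠ "" := by intro hh; subst hh; simp at hp0
          conv_lhs => rw [gConsume]
          simp [hb, hpne]
        have hstep : aInner li (f + 1) (c :: cs) res
            = (if ((c :: cs).drop p.toList.length).length = 0 then true
               else aInner li f ((c :: cs).drop p.toList.length) res) := by
          show (if (aScan li (c :: cs)).length = 0 then true
                else aInner li f (aScan li (c :: cs)) res) = _
          rw [hA]
        by_cases hz : ((c :: cs).drop p.toList.length).length = 0
        · have : (c :: cs).drop p.toList.length = [] := List.length_eq_zero_iff.mp hz
          rw [hstep, if_pos hz, hC, this, gConsume_nil]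
          simp
        · have hne : (c :: cs).drop p.toList.length ≠ [] := by
            intro hcon; exact hz (by rw [hcon]; rfl)
          have hle : ((c :: cs).drop p.toList.length).length ≤ f := by
            have h1 : 1 ≤ p.toList.length := Nat.one_le_iff_ne_zero.mpr hp0
            rw [List.length_drop]
            simp only [List.length_cons] at hl ⊢
            omega
          rw [hstep, if_neg hz, ih _ hne hle, hC]

theorem outer_eq (seq : List String) (word : List Char) (hw : word ≠ []) :
    ∀ (idxs : List Nat) (res : Bool),
      aOuter seq word idxs res
        = (res || idxs.any (fun i => gConsume word (seq.drop i ++ seq.take i))) := by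
  intro idxs
  induction idxs with
  | nil => intro res; simp [aOuter]
  | cons i rest ih =>
    intro res
    have hr := inner_eq (li := seq.drop i ++ seq.take i) res word.length word hw le_rfl
    by_cases hc : gConsume word (seq.drop i ++ seq.take i) = true
    · simp [aOuter, hr, hc]
    · simp only [Bool.not_eq_true] at hc
      cases res with
      | true => simp [aOuter, hr, hc]
      | false => simp [aOuter, hr, hc, ih]

theorem outer_nilword (seq : List String) :
    ∀ (idxs : List Nat) (res : Bool), aOuter seq [] idxs res = res := by
  intro idxs
  induction idxs with
  | nil => intro res; rfl
  | cons i rest ih =>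
    intro res
    cases res <;> simp [aOuter, aInner, ih]

-- ---- B-side: bRun computes gConsume on the rotated piece list ----

theorem map_range_getD (seq : List String) :
    (List.range seq.length).map (fun j => seq.getD j "") = seq := by
  apply List.ext_getElem
  · simp
  · intro k h1 h2
    simp [List.getD_eq_getElem?_getD, h2]

theorem keyA (i n j : Nat) (h1 : i ≤ j) (h2 : j < n) :
    PySem.Int.mod ((j : Int) - (i : Int)) (n : Int) = (j : Int) - (i : Int) := by
  rw [PySem.Int.mod_eq_emod_of_pos (by omega)]
  exact Int.emod_eq_of_lt (by omega) (by omega)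

theorem keyB (i n j : Nat) (h1 : j < i) (h2 : i < n) :
    PySem.Int.mod ((j : Int) - (i : Int)) (n : Int) = (j : Int) - (i : Int) + (n : Int) := by
  rw [PySem.Int.mod_eq_emod_of_pos (by omega)]
  have hstep : ((j : Int) - i) % (n : Int) = ((j : Int) - i + n) % (n : Int) := by
    conv_lhs => rw [show ((j : Int) - (i : Int)) = ((j : Int) - i + n) + (n : Int) * (-1) by ring]
    rw [Int.add_mul_emod_self_left]
  rw [hstep]
  exact Int.emod_eq_of_lt (by omega) (by omega)

theorem keyInj (i n j1 j2 : Nat) (hi : i < n) (h1 : j1 < n) (h2 : j2 < n)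
    (h : PySem.Int.mod ((j1 : Int) - (i : Int)) (n : Int)
       = PySem.Int.mod ((j2 : Int) - (i : Int)) (n : Int)) : j1 = j2 := by
  rcases Nat.lt_or_ge j1 i with ha | ha <;> rcases Nat.lt_or_ge j2 i with hb | hb
  · rw [keyB i n j1 ha hi, keyB i n j2 hb hi] at h; omega
  · rw [keyB i n j1 ha hi, keyA i n j2 hb h2] at h; omega
  · rw [keyA i n j1 ha h1, keyB i n j2 hb hi] at h; omega
  · rw [keyA i n j1 ha h1, keyA i n j2 hb h2] at h; omega

theorem mem_rot (i n j : Nat) :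
    j ∈ (List.range n).drop i ++ (List.range n).take i ↔ j < n := by
  constructor
  · intro h
    rcases List.mem_append.mp h with h | h
    · exact List.mem_range.mp (List.mem_of_mem_drop h)
    · exact List.mem_range.mp (List.mem_of_mem_take h)
  · intro h
    have : j ∈ (List.range n).take i ++ (List.range n).drop i := by
      rw [List.take_append_drop]; exact List.mem_range.mpr h
    exact List.mem_append.mpr (List.mem_append.mp this).symm

theorem mem_drop_range (i n j : Nat) (h : j ∈ (List.range n).drop i) : i ≤ j ∧ j < n := by
  have h2 : j < n := List.mem_range.mp (List.mem_of_mem_drop h)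
  rw [List.range_eq_range', List.drop_range'] at h
  simp only [Nat.zero_add] at h
  have := List.mem_range'_1.mp h
  omega

theorem pairwise_key (i n : Nat) (hi : i < n) :
    ((List.range n).drop i ++ (List.range n).take i).Pairwise
      (fun (a b : Nat) => PySem.Int.mod ((a : Int) - (i : Int)) (n : Int)
                < PySem.Int.mod ((b : Int) - (i : Int)) (n : Int)) := by
  rw [List.pairwise_append]
  refine ⟨?_, ?_, ?_⟩
  · have hlt : ((List.range n).drop i).Pairwise (· < ·) :=
      (List.pairwise_lt_range).sublist (List.drop_sublist i _)
    refine List.Pairwise.imp_of_mem ?_ hlt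
    intro a b ha hb hab
    obtain ⟨ha1, ha2⟩ := mem_drop_range i n a ha
    obtain ⟨hb1, hb2⟩ := mem_drop_range i n b hb
    rw [keyA i n a ha1 ha2, keyA i n b hb1 hb2]
    omega
  · have hlt : ((List.range n).take i).Pairwise (· < ·) :=
      (List.pairwise_lt_range).sublist (List.take_sublist i _)
    refine List.Pairwise.imp_of_mem ?_ hlt
    intro a b ha hb hab
    have ha1 : a < i := by
      rw [List.take_range] at ha; exact lt_of_lt_of_le (List.mem_range.mp ha) (Nat.min_le_left _ _)
    have hb1 : b < i := by
      rw [List.take_range] at hb; exact lt_of_lt_of_le (List.mem_range.mp hb) (Nat.min_le_left _ _)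
    rw [keyB i n a ha1 hi, keyB i n b hb1 hi]
    omega
  · intro a ha b hb
    obtain ⟨ha1, ha2⟩ := mem_drop_range i n a ha
    have hb1 : b < i := by
      rw [List.take_range] at hb; exact lt_of_lt_of_le (List.mem_range.mp hb) (Nat.min_le_left _ _)
    rw [keyA i n a ha1 ha2, keyB i n b hb1 hi]
    omega

theorem find?_min_key {α : Type} (key : α → Int) (p : α → Bool) (l : List α) (x : α)
    (hpw : l.Pairwise (fun a b => key a < key b)) (h : l.find? p = some x) :
    ∀ y ∈ l, p y = true → key x ≤ key y := by
  induction l with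
  | nil => simp at h
  | cons a t ih =>
    rcases List.pairwise_cons.mp hpw with ⟨hhead, htail⟩
    by_cases hpa : p a = true
    · rw [List.find?_cons_of_pos hpa] at h
      cases h
      intro y hy _
      rcases List.mem_cons.mp hy with rfl | hy
      · exact le_refl _
      · exact le_of_lt (hhead y hy)
    · rw [List.find?_cons_of_neg (by simpa using hpa)] at h
      intro y hy hpy
      rcases List.mem_cons.mp hy with rfl | hy
      · exact absurd hpy hpa
      · exact ih htail h y hy hpy

theorem gFirst_map (f : Nat → String) (l : List Nat) (w' : List Char) :
    gFirst (l.map f) w' = (l.find? (fun j => PySem.Chars.startswith w' (f j).toList)).map f := by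
  induction l with
  | nil => simp [gFirst]
  | cons a t ih =>
    by_cases hs : PySem.Chars.startswith w' (f a).toList = true
    · simp [gFirst, hs]
    · rw [List.map_cons, List.find?_cons_of_neg (by simpa using hs)]
      simpa [gFirst, hs] using ih

theorem first_eq (seq : List String) (w' : List Char) (i : Nat) (hi : i < seq.length) :
    gFirst (seq.drop i ++ seq.take i) w'
      = (PySem.List.min?
          ((List.range seq.length).filter (fun j => PySem.Chars.startswith w' (seq.getD j "").toList))
          (fun j => PySem.Int.mod ((j : Int) - (i : Int)) ((seq.length : Nat) : Int))).map
          (fun j => seq.getD j "") := by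
  set n := seq.length with hn
  set f : Nat → String := fun j => seq.getD j "" with hf
  set p : Nat → Bool := fun j => PySem.Chars.startswith w' (f j).toList with hp
  set key : Nat → Int := fun j => PySem.Int.mod ((j : Int) - (i : Int)) (n : Int) with hkey
  set rot : List Nat := (List.range n).drop i ++ (List.range n).take i with hrot
  have hpieces : seq.drop i ++ seq.take i = rot.map f := by
    rw [hrot, List.map_append]
    have hseq : seq = (List.range n).map f := (map_range_getD seq).symm
    rw [List.map_drop, List.map_take, ← hseq]
  rw [hpieces, gFirst_map]
  set ms : List Nat := (List.range n).filter p with hms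
  cases hmin : PySem.List.min? ms key with
  | none =>
    have hnil : ms = [] := (PySem.List.min?_eq_none_iff _ _).mp hmin
    have hfind : rot.find? p = none := by
      rw [List.find?_eq_none]
      intro j hj
      have hjn : j < n := (mem_rot i n j).mp hj
      have := List.filter_eq_nil_iff.mp hnil j (List.mem_range.mpr hjn)
      simpa using this
    rw [hfind]
  | some m =>
    have hmmem : m ∈ ms := PySem.List.min?_mem hmin
    have hmn : m < n := List.mem_range.mp (List.mem_filter.mp hmmem).1
    have hpm : p m = true := (List.mem_filter.mp hmmem).2
    cases hfind : rot.find? p with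
    | none =>
      exact absurd hpm (by simpa using List.find?_eq_none.mp hfind m ((mem_rot i n m).mpr hmn))
    | some x =>
      have hpx : p x = true := List.find?_some hfind
      have hxrot : x ∈ rot := List.mem_of_find?_eq_some hfind
      have hxn : x < n := (mem_rot i n x).mp hxrot
      have hxms : x ∈ ms := List.mem_filter.mpr ⟨List.mem_range.mpr hxn, hpx⟩
      have h1 : key x ≤ key m :=
        find?_min_key key p rot x (pairwise_key i n hi) hfind m ((mem_rot i n m).mpr hmn) hpm
      have h2 : key m ≤ key x := PySem.List.min?_isMin hmin x hxms
      have : x = m := keyInj i n x m hi hxn hmn (le_antisymm h1 h2)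
      rw [this]

theorem bRun_eq (seq : List String) (w : List Char) (i : Nat) (hi : i < seq.length) :
    ∀ (d pos : Nat), pos ≤ w.length → w.length - pos ≤ d →
      bRun seq (bMatches seq w w.length seq.length) w.length seq.length i pos
        = gConsume (w.drop pos) (seq.drop i ++ seq.take i) := by
  intro d
  induction d with
  | zero =>
    intro pos hle hd
    have hpos : pos = w.length := by omega
    rw [bRun]
    simp only [hpos, lt_irrefl, dite_false]
    rw [List.drop_length, gConsume_nil]
  | succ d ih =>
    intro pos hle hd
    by_cases hpos : pos < w.length
    · have hmsg : (bMatches seq w w.length seq.length).getD pos []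
          = (List.range seq.length).filter
              (fun j => PySem.Chars.startswith (w.drop pos) (seq.getD j "").toList) := by
        simp [bMatches, List.getD_eq_getElem?_getD, hpos]
      have hne : w.drop pos ≠ [] := by
        intro hcon
        have := congrArg List.length hcon
        simp only [List.length_drop, List.length_nil] at this
        omega
      rw [bRun, dif_pos hpos, hmsg]
      conv_rhs => rw [gConsume]
      rw [dif_neg hne, first_eq seq (w.drop pos) i hi]
      cases hmin : PySem.List.min?
          ((List.range seq.length).filter (fun j => PySem.Chars.startswith (w.drop pos) (seq.getD j "").toList))
          (fun j => PySem.Int.mod ((j : Int) - (i : Int)) ((seq.length : Nat) : Int)) with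
      | none => rfl
      | some m =>
        simp only [Option.map_some]
        by_cases hp0 : (seq.getD m "").toList.length = 0
        · rw [dif_pos hp0, dif_pos hp0]
        · rw [dif_neg hp0, dif_neg hp0]
          have hmmem := PySem.List.min?_mem hmin
          have hpm : PySem.Chars.startswith (w.drop pos) (seq.getD m "").toList = true :=
            (List.mem_filter.mp hmmem).2
          have hpre : (seq.getD m "").toList <+: w.drop pos :=
            (PySem.Chars.startswith_iff _ _).mp hpm
          have hlen : (seq.getD m "").toList.length ≤ w.length - pos := by
            have := hpre.length_le
            simpa [List.length_drop] using this
          rw [List.drop_drop]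
          rw [show pos + (seq.getD m "").toList.length = (seq.getD m "").toList.length + pos from by omega]
          exact ih ((seq.getD m "").toList.length + pos) (by omega) (by omega)
    · have hpos' : pos = w.length := by omega
      rw [bRun]
      simp only [hpos', lt_irrefl, dite_false]
      rw [List.drop_length, gConsume_nil]

theorem any_congr_mem {α : Type} (l : List α) (f g : α → Bool)
    (h : ∀ x ∈ l, f x = g x) : l.any f = l.any g := by
  induction l with
  | nil => rfl
  | cons a t ih =>
    simp only [List.any_cons, h a (List.mem_cons_self), ih (fun x hx => h x (List.mem_cons_of_mem a hx))]

theorem alt_eq (seq : List String) (word : String) (result : Bool) :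
    valid_word_alt seq word result
      = (result || (List.range seq.length).any
          (fun i => gConsume word.toList (seq.drop i ++ seq.take i))) := by
  have h : valid_word_alt seq word result
      = (result || (List.range seq.length).any
          (fun i => bRun seq (bMatches seq word.toList word.toList.length seq.length)
                      word.toList.length seq.length i 0)) := rfl
  rw [h]
  congr 1
  apply any_congr_mem
  intro i hi
  have hi' : i < seq.length := List.mem_range.mp hi
  have := bRun_eq seq word.toList i hi' word.toList.length 0 (by omega) (by omega)
  simpa using this

-- ===== VERDICT (by name: the statement is the Claim_ definition above) =====
theorem valid_word_spec : Claim_unchanged_valid_word := by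
  intro seq word result _ hnD
  by_cases hw : word.toList = []
  · have hcase : seq = [] ∨ result = true := by
      unfold D_valid_word at hnD
      by_cases hs : seq = []
      · exact Or.inl hs
      · cases result with
        | true => exact Or.inr rfl
        | false => exact absurd ⟨hw, hs, rfl⟩ hnD
    have hA : valid_word seq word result = result := by
      unfold valid_word
      rw [hw, outer_nilword]
    rcases hcase with hs | hr
    · subst hs
      simp [hA, valid_word_alt]
    · subst hr
      simp [hA, alt_eq]
  · unfold valid_word
    rw [outer_eq seq word.toList hw, alt_eq]

theorem valid_word_changed : Claim_changed_valid_word := by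
  unfold Claim_changed_valid_word
  refine ⟨by decide, by decide, by decide, ?_, by decide⟩
  show valid_word_alt ["ab"] "" false = true
  rw [alt_eq]
  simp [gConsume]

theorem valid_word_tight : Claim_exact_valid_word := by
  intro seq word result _ hD
  obtain ⟨hw, hs, hr⟩ := hD
  have hA : valid_word seq word result = false := by
    unfold valid_word
    rw [hw, outer_nilword, hr]
  have hB : valid_word_alt seq word result = true := by
    rw [alt_eq, hr]
    simp only [Bool.false_or]
    refine List.any_eq_true.mpr ⟨0, ?_, ?_⟩
    · simp [List.mem_range, List.length_pos_iff]
      exact hs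
    · rw [hw]; simp [gConsume]
  rw [hA, hB]
  simp
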